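-- pv_equiv track=rewrite | github.com/Jane11111/Leetcode2021 | Tencent03.py | solve
-- ===== SOURCE A (Python) =====
-- def solve(lst):
--     lst.sort()
--
--     ans = 0
--     last_idx = -1
--
--     i = 0
--     while i<len(lst):
--
--
--         while lst[i]-lst[last_idx+1]>10:
--             last_idx+=1
--         ans = max(ans,i-last_idx)
--         i+=1
--     return ans
-- ===== SOURCE B (Python) =====
-- def solve(lst):
--     lst.sort()
--     ans = 0
--     for i in range(len(lst)):
--         t = lst[i] - 10
--         lo, hi = 0, i
--         while lo < hi:
--             mid = (lo + hi) // 2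
--             if lst[mid] < t:
--                 lo = mid + 1
--             else:
--                 hi = mid
--         if i - lo + 1 > ans:
--             ans = i - lo + 1
--     return ans
-- ===== Notes on version B (the rewrite author's own statement) =====
-- stated objective: alternative
-- what changed: replaces A's shared two-pointer state (last_idx advanced monotonically across the outer loop) with an independent hand-rolled binary search per right endpoint for the leftmost element >= lst[i]-10
import Mathlib
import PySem

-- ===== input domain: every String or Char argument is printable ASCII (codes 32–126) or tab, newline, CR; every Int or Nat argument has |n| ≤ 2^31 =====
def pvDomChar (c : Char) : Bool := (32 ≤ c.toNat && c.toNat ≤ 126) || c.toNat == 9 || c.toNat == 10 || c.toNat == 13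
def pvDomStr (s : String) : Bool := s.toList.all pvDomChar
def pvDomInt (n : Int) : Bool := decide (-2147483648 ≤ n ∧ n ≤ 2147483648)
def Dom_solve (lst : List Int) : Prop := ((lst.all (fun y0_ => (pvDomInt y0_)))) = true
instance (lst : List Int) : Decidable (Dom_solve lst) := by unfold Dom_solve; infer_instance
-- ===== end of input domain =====

-- B replaces A's monotone two-pointer advance by an independent per-endpoint binary search
-- (alternative decomposition, same asymptotic cost; both Pythons sort the argument in place,
-- the equivalence proved here is about the return value).

-- ===== PORT A =====
-- A's inner 'while lst[i]-lst[last_idx+1]>10: last_idx+=1'; fuel only makes the recursion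
-- total (the Python loop always stops at an index ≤ i, so fuel = len(lst) is never exhausted
-- and the 'none' (IndexError) branch is never reached on Python's runs).
def solveInner (s : List Int) (xi : Int) : Nat → Int → Int
  | 0, last => last
  | fuel + 1, last =>
      match PySem.List.pyGet? s (last + 1) with
      | none => last
      | some v => if xi - v > 10 then solveInner s xi fuel (last + 1) else last

def solve (lst : List Int) : Int :=
  let s := PySem.List.sorted lst (fun x => x) false
  ((List.range s.length).foldl (fun (st : Int × Int) (i : Nat) =>
      match PySem.List.pyGet? s (i : Int) with
      | none => st
      | some xi =>
          let last := solveInner s xi s.length st.2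
          (max st.1 ((i : Int) - last), last)) ((0 : Int), (-1 : Int))).1

-- ===== PORT B =====
-- Source B's hand-written binary search; 'lst[mid]' has a nonnegative in-range index
-- (mid < hi ≤ i < len), so plain getD is exact there.
def solveBsearch (s : List Int) (t : Int) (lo hi : Nat) : Nat :=
  if h : lo < hi then
    let mid := (lo + hi) / 2
    if s.getD mid 0 < t then solveBsearch s t (mid + 1) hi else solveBsearch s t lo mid
  else lo
termination_by hi - lo
decreasing_by all_goals omega

def solve_alt (lst : List Int) : Int :=
  let s := PySem.List.sorted lst (fun x => x) false
  (List.range s.length).foldl (fun (ans : Int) (i : Nat) =>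
      let t := s.getD i 0 - 10
      let lo := solveBsearch s t 0 i
      if (i : Int) - lo + 1 > ans then (i : Int) - lo + 1 else ans) 0

-- ===== PRECONDITION & SPEC =====
def Spec_solve (lst : List Int) (out : Int) : Prop := out = solve_alt lst
instance (lst : List Int) (out : Int) : Decidable (Spec_solve lst out) := by unfold Spec_solve; infer_instance

-- ===== CLAIM (what is proved, stated in full; the proofs are below) =====
def Claim_equal_solve : Prop := ∀ (lst : List Int), Dom_solve lst → Spec_solve lst (solve lst)

-- ===== LEMMAS AND PROOFS =====

-- number of elements < t among the first m elements of s
def cntLt (s : List Int) (t : Int) (m : Nat) : Nat :=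
  (s.take m).countP (fun x => decide (x < t))

theorem cntLt_le (s : List Int) (t : Int) (m : Nat) : cntLt s t m ≤ m := by
  calc cntLt s t m ≤ (s.take m).length := List.countP_le_length
    _ ≤ m := by simp

theorem sorted_mono {s : List Int} (hs : s.Pairwise (· ≤ ·)) {j k : Nat}
    (hjk : j ≤ k) (hk : k < s.length) : s[j]'(by omega) ≤ s[k] := by
  rcases Nat.eq_or_lt_of_le hjk with rfl | h
  · exact le_refl _
  · exact (List.pairwise_iff_getElem.mp hs) j k (by omega) hk h

-- L1: if everything below j is < t, the count up to j is j
theorem cntLt_eq_self {s : List Int} {t : Int} {j : Nat} (hj : j ≤ s.length)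
    (hall : ∀ k (hk : k < s.length), k < j → s[k] < t) : cntLt s t j = j := by
  have hlen : (s.take j).length = j := by simp [hj]
  have : ∀ x ∈ s.take j, (fun x => decide (x < t)) x = true := by
    intro x hx
    rw [List.mem_iff_getElem] at hx
    obtain ⟨k, hk, rfl⟩ := hx
    have hkj : k < j := by omega
    simp only [List.getElem_take]
    simpa using hall k (by omega) hkj
  rw [cntLt, List.countP_eq_length.mpr this, hlen]

-- L2: if everything in [m, hi) is ≥ t, the counts up to m and up to hi agree
theorem cntLt_eq_of_ge {s : List Int} {t : Int} {m hi : Nat} (hm : m ≤ hi) (hhi : hi ≤ s.length)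
    (hge : ∀ k (hk : k < s.length), m ≤ k → k < hi → t ≤ s[k]) : cntLt s t hi = cntLt s t m := by
  have hsplit : s.take hi = (s.take hi).take m ++ (s.take hi).drop m := (List.take_append_drop _ _).symm
  have htt : (s.take hi).take m = s.take m := by
    rw [List.take_take]; congr 1; omega
  have hzero : ((s.take hi).drop m).countP (fun x => decide (x < t)) = 0 := by
    rw [List.countP_eq_zero]
    intro x hx
    rw [List.mem_iff_getElem] at hx
    obtain ⟨k, hk, rfl⟩ := hx
    have hlen : (s.take hi).length = hi := by simp [hhi]
    have hk' : m + k < hi := by simp [hlen] at hk; omega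
    simp only [List.getElem_drop, List.getElem_take]
    simpa using hge (m + k) (by omega) (by omega) hk'
  calc cntLt s t hi = ((s.take hi).take m ++ (s.take hi).drop m).countP (fun x => decide (x < t)) := by
        rw [cntLt, ← hsplit]
    _ = cntLt s t m := by rw [List.countP_append, htt, hzero]; simp [cntLt]

-- L3: indices below the count carry elements < t (sorted list)
theorem lt_of_lt_cntLt {s : List Int} (hs : s.Pairwise (· ≤ ·)) {t : Int} {m k : Nat}
    (hm : m ≤ s.length) (hk : k < cntLt s t m) : s[k]'(by have := cntLt_le s t m; omega) < t := by
  by_contra hge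
  rw [not_lt] at hge
  have hkm : k < m := by have := cntLt_le s t m; omega
  have : cntLt s t m = cntLt s t k := by
    refine cntLt_eq_of_ge (by omega) hm ?_
    intro j hj hkj hjm
    exact le_trans hge (sorted_mono hs hkj hj)
  have := cntLt_le s t k
  omega

-- binary-search correctness: solveBsearch computes the count below hi
theorem solveBsearch_eq {s : List Int} (hs : s.Pairwise (· ≤ ·)) (t : Int) :
    ∀ n lo hi, hi - lo ≤ n → lo ≤ hi → hi ≤ s.length →
      (∀ k (hk : k < s.length), k < lo → s[k] < t) →
      solveBsearch s t lo hi = cntLt s t hi := by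
  intro n
  induction n with
  | zero =>
      intro lo hi hn hlh hhi hinv
      have : lo = hi := by omega
      subst this
      rw [solveBsearch]
      simp only [lt_irrefl, dite_false]
      exact (cntLt_eq_self hhi hinv).symm
  | succ n ih =>
      intro lo hi hn hlh hhi hinv
      rw [solveBsearch]
      by_cases h : lo < hi
      · simp only [h, dite_true]
        have hmidlo : lo ≤ (lo + hi) / 2 := by omega
        have hmidhi : (lo + hi) / 2 < hi := by omega
        have hmidlen : (lo + hi) / 2 < s.length := by omega
        rw [List.getD_eq_getElem s 0 hmidlen]
        by_cases hc : s[(lo + hi) / 2] < t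
        · simp only [hc, if_true]
          refine ih ((lo + hi) / 2 + 1) hi (by omega) (by omega) hhi ?_
          intro k hk hklt
          exact lt_of_le_of_lt (sorted_mono hs (by omega) hmidlen) hc
        · simp only [hc, if_false]
          rw [ih lo ((lo + hi) / 2) (by omega) (by omega) (by omega) hinv]
          exact (cntLt_eq_of_ge (by omega) hhi (fun k hk hmk hkhi =>
            le_trans (not_lt.mp hc) (sorted_mono hs hmk hk))).symm
      · simp only [h, dite_false]
        have : lo = hi := by omega
        subst this
        exact (cntLt_eq_self hhi hinv).symm

-- A's inner while-loop computes (count below i) - 1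
theorem solveInner_eq {s : List Int} (hs : s.Pairwise (· ≤ ·)) {i : Nat} (hi : i < s.length) :
    ∀ fuel j, j ≤ i → i - j + 1 ≤ fuel →
      (∀ k (hk : k < s.length), k < j → s[k] < s[i] - 10) →
      solveInner s s[i] fuel ((j : Int) - 1) = (cntLt s (s[i] - 10) i : Int) - 1 := by
  intro fuel
  induction fuel with
  | zero => intro j hj hfuel hinv; omega
  | succ fuel ih =>
      intro j hj hfuel hinv
      rw [solveInner]
      have hje : ((j : Int) - 1 + 1) = (j : Int) := by ring
      rw [hje, PySem.List.pyGet?_natCast]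
      have hjlen : j < s.length := by omega
      rw [List.getElem?_eq_getElem hjlen]
      simp only
      by_cases hc : s[i] - s[j] > 10
      · simp only [hc, if_true]
        have hji : j < i := by
          rcases Nat.eq_or_lt_of_le hj with rfl | h
          · omega
          · exact h
        have hje2 : (j : Int) = ((j + 1 : Nat) : Int) - 1 := by push_cast; ring
        rw [hje2]
        refine ih (j + 1) (by omega) (by omega) ?_
        intro k hk hklt
        exact lt_of_le_of_lt (sorted_mono hs (by omega) hjlen) (by omega)
      · simp only [hc, if_false]
        have hcnt : cntLt s (s[i] - 10) i = j := by
          rw [cntLt_eq_of_ge hj (by omega) (fun k hk hjk hki =>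
            le_trans (by omega) (sorted_mono hs hjk hk))]
          exact cntLt_eq_self (by omega) hinv
        rw [hcnt]

-- the two folds over range agree (generalized over the suffix of indices)
theorem fold_eq {s : List Int} (hs : s.Pairwise (· ≤ ·)) :
    ∀ (cnt i₀ : Nat) (ans : Int) (j : Nat), i₀ + cnt = s.length → j ≤ i₀ →
      (∀ k (hk : k < s.length), k < j → ∀ m (hm : m < s.length), i₀ ≤ m → s[k] < s[m] - 10) →
      ((List.range' i₀ cnt).foldl (fun (st : Int × Int) (i : Nat) =>
          match PySem.List.pyGet? s (i : Int) with
          | none => st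
          | some xi =>
              let last := solveInner s xi s.length st.2
              (max st.1 ((i : Int) - last), last)) (ans, (j : Int) - 1)).1 =
      (List.range' i₀ cnt).foldl (fun (ans : Int) (i : Nat) =>
          let t := s.getD i 0 - 10
          let lo := solveBsearch s t 0 i
          if (i : Int) - lo + 1 > ans then (i : Int) - lo + 1 else ans) ans := by
  intro cnt
  induction cnt with
  | zero => intro i₀ ans j _ _ _; simp
  | succ cnt ih =>
      intro i₀ ans j hlen hji hinv
      have hi₀ : i₀ < s.length := by omega
      rw [List.range'_succ, List.foldl_cons, List.foldl_cons]
      rw [PySem.List.pyGet?_natCast, List.getElem?_eq_getElem hi₀]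
      simp only
      -- the new pointer state
      have hinner : solveInner s s[i₀] s.length ((j : Int) - 1)
          = (cntLt s (s[i₀] - 10) i₀ : Int) - 1 := by
        refine solveInner_eq hs hi₀ s.length j hji (by omega) ?_
        intro k hk hkj
        exact hinv k hk hkj i₀ hi₀ (le_refl _)
      have hb : solveBsearch s (s.getD i₀ 0 - 10) 0 i₀ = cntLt s (s[i₀] - 10) i₀ := by
        rw [List.getD_eq_getElem s 0 hi₀]
        exact solveBsearch_eq hs _ i₀ 0 i₀ (by omega) (by omega) (by omega) (by omega)
      have hc := cntLt_le s (s[i₀] - 10) i₀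
      set c := cntLt s (s[i₀] - 10) i₀ with hcdef
      have hanseq : max ans ((i₀ : Int) - ((c : Int) - 1))
          = (if (i₀ : Int) - (c : Int) + 1 > ans then (i₀ : Int) - (c : Int) + 1 else ans) := by
        rw [max_def]; split_ifs <;> omega
      have hstep := ih (i₀ + 1) (if (i₀ : Int) - (c : Int) + 1 > ans then (i₀ : Int) - (c : Int) + 1 else ans) c
        (by omega) (by omega) ?_
      · rw [hinner, hb, hanseq]
        exact hstep
      · intro k hk hkc m hm him
        have h1 : s[k] < s[i₀] - 10 := lt_of_lt_cntLt hs (by omega) hkc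
        have h2 : s[i₀] ≤ s[m] := sorted_mono hs (by omega) hm
        omega

-- ===== VERDICT (by name: the statement is the Claim_ definition above) =====
theorem solve_spec : Claim_equal_solve := by
  intro lst _
  unfold Spec_solve solve solve_alt
  simp only
  have hs : (PySem.List.sorted lst (fun x => x) false).Pairwise (· ≤ ·) := by
    have := PySem.List.sorted_pairwise lst (fun x => x)
    simpa using this
  have h := fold_eq hs (PySem.List.sorted lst (fun x => x) false).length 0 0 0 (by omega) (le_refl _)
    (by intro k hk hkj; omega)
  rw [List.range_eq_range']
  simpa using h
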